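-- pv_equiv track=rewrite | github.com/K0DA-PARALLAXStudio/TensorSort_Model_Installer-Comfyui | _Module/modul3_clip.py | detect_encoder_type
-- ===== SOURCE A (Python) =====
-- def detect_encoder_type(keys):
--     """Unterscheidet: clip / text_encoder / clip_vision
--
--     Returns:
--         str: "clip", "text_encoder", "clip_vision", oder None
--     """
--     # 1. CLIP Vision (Image Encoder)
--     if any("vision_model" in k or "visual.transformer" in k for k in keys):
--         return "clip_vision"
--
--     # 2. T5/BERT (Non-CLIP Text Encoder)
--     if any("encoder.block" in k or "decoder.block" in k for k in keys):
--         return "text_encoder"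
--
--     # 3. Standard CLIP (Text Encoder)
--     if any("text_model.encoder" in k or "clip_l" in k or "clip_g" in k for k in keys):
--         return "clip"
--
--     return None
-- ===== SOURCE B (Python) =====
-- def detect_encoder_type(keys):
--     """Unterscheidet: clip / text_encoder / clip_vision
--
--     Returns:
--         str: "clip", "text_encoder", "clip_vision", oder None
--     """
--     is_vision = is_text = is_clip = False
--     for k in keys:
--         if "vision_model" in k or "visual.transformer" in k:
--             is_vision = True
--         elif "encoder.block" in k or "decoder.block" in k:
--             is_text = True
--         elif "text_model.encoder" in k or "clip_l" in k or "clip_g" in k: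
--             is_clip = True
--     if is_vision:
--         return "clip_vision"
--     if is_text:
--         return "text_encoder"
--     if is_clip:
--         return "clip"
--     return None
-- ===== Notes on version B (the rewrite author's own statement) =====
-- stated objective: alternative
-- what changed: Replaces A's three separate any() scans over keys with a single pass maintaining three boolean flags, then one priority decision after the loop.
import Mathlib
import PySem

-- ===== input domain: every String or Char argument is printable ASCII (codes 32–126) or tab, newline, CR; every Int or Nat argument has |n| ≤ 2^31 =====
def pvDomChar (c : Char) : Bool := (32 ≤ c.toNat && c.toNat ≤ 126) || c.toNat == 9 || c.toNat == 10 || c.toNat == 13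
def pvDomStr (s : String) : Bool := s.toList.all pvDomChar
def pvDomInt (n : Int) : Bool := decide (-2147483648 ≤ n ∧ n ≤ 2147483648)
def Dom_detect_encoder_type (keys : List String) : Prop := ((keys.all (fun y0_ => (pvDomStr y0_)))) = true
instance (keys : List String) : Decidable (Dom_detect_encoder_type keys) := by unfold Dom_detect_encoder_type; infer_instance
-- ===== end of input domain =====

-- B replaces A's three separate any() scans with a single pass collecting three flags
-- followed by one priority decision (objective: alternative, same cost).

-- ===== PORT A =====
-- the three tier predicates, exactly A's conditions
def pvVis (k : String) : Bool :=
  PySem.Str.isIn "vision_model" k || PySem.Str.isIn "visual.transformer" k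
def pvTxt (k : String) : Bool :=
  PySem.Str.isIn "encoder.block" k || PySem.Str.isIn "decoder.block" k
def pvClp (k : String) : Bool :=
  PySem.Str.isIn "text_model.encoder" k || PySem.Str.isIn "clip_l" k || PySem.Str.isIn "clip_g" k

def detect_encoder_type (keys : List String) : Option String :=
  if keys.any pvVis then some "clip_vision"
  else if keys.any pvTxt then some "text_encoder"
  else if keys.any pvClp then some "clip"
  else none

-- ===== PORT B =====
-- one loop step of Source B's for-loop: if/elif chain updating the three flags
def pvStep (st : Bool × Bool × Bool) (k : String) : Bool × Bool × Bool :=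
  if pvVis k then (true, st.2.1, st.2.2)
  else if pvTxt k then (st.1, true, st.2.2)
  else if pvClp k then (st.1, st.2.1, true)
  else st

def detect_encoder_type_alt (keys : List String) : Option String :=
  let st := keys.foldl pvStep (false, false, false)
  if st.1 then some "clip_vision"
  else if st.2.1 then some "text_encoder"
  else if st.2.2 then some "clip"
  else none

-- ===== PRECONDITION & SPEC =====
def Spec_detect_encoder_type (keys : List String) (out : Option String) : Prop := out = detect_encoder_type_alt keys
instance (keys : List String) (out : Option String) : Decidable (Spec_detect_encoder_type keys out) := by unfold Spec_detect_encoder_type; infer_instance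

-- ===== CLAIM (what is proved, stated in full; the proofs are below) =====
def Claim_equal_detect_encoder_type : Prop := ∀ (keys : List String), Dom_detect_encoder_type keys → Spec_detect_encoder_type keys (detect_encoder_type keys)

-- ===== LEMMAS AND PROOFS =====

-- the loop's flags are the three 'any's, each gated by the earlier tiers' elif
theorem pvFold_char (keys : List String) (st : Bool × Bool × Bool) :
    keys.foldl pvStep st =
      (st.1 || keys.any pvVis,
       st.2.1 || keys.any (fun k => !pvVis k && pvTxt k),
       st.2.2 || keys.any (fun k => !pvVis k && !pvTxt k && pvClp k)) := by
  induction keys generalizing st with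
  | nil => simp
  | cons k ks ih =>
    simp only [List.foldl_cons, List.any_cons, ih, pvStep]
    rcases st with ⟨a, b, c⟩
    by_cases hv : pvVis k <;> by_cases ht : pvTxt k <;> by_cases hc : pvClp k <;>
      simp [hv, ht, hc]

theorem pvAny_gate (keys : List String) (p q : String → Bool)
    (h : keys.any p = false) :
    keys.any (fun k => !p k && q k) = keys.any q := by
  induction keys with
  | nil => rfl
  | cons k ks ih =>
    simp only [List.any_cons, Bool.or_eq_false_iff] at h
    simp [List.any_cons, h.1, ih h.2]

-- ===== VERDICT (by name: the statement is the Claim_ definition above) =====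
theorem detect_encoder_type_spec : Claim_equal_detect_encoder_type := by
  intro keys _
  show detect_encoder_type keys = detect_encoder_type_alt keys
  unfold detect_encoder_type detect_encoder_type_alt
  rw [pvFold_char]
  by_cases hv : keys.any pvVis
  · simp [hv]
  · simp only [Bool.not_eq_true] at hv
    rw [pvAny_gate keys pvVis _ hv]
    by_cases ht : keys.any pvTxt
    · simp [hv, ht]
    · simp only [Bool.not_eq_true] at ht
      have : keys.any (fun k => !pvVis k && !pvTxt k && pvClp k)
           = keys.any pvClp := by
        rw [show (fun k => !pvVis k && !pvTxt k && pvClp k)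
              = (fun k => !pvVis k && (!pvTxt k && pvClp k)) from by
            funext k; rw [Bool.and_assoc]]
        rw [pvAny_gate keys pvVis _ hv, pvAny_gate keys pvTxt _ ht]
      simp [hv, ht, this]
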